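-- pv_equiv track=rewrite | github.com/XioAISolutions/crumb-format | cli/squeeze.py | _strip_annotations
-- ===== SOURCE A (Python) =====
-- from typing import Dict, List, Tuple
--
-- def _strip_annotations(body: List[str]) -> Tuple[List[str], int | None, str | None]:
--     """Strip leading ``@type:`` / ``@priority:`` annotations and return remainder.
--
--     Returns (cleaned_body, priority_or_None, type_or_None).
--     """
--     priority: int | None = None
--     content_type: str | None = None
--     cleaned: List[str] = list(body)
--     for _ in range(2):
--         idx = next((i for i, line in enumerate(cleaned) if line.strip()), None)
--         if idx is None:
--             break
--         stripped = cleaned[idx].strip()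
--         if stripped.startswith("@priority:"):
--             try:
--                 priority = int(stripped.split(":", 1)[1].strip())
--             except ValueError:
--                 priority = None
--             cleaned.pop(idx)
--             continue
--         if stripped.startswith("@type:"):
--             content_type = stripped.split(":", 1)[1].strip()
--             cleaned.pop(idx)
--             continue
--         break
--     return cleaned, priority, content_type
-- ===== SOURCE B (Python) =====
-- from typing import Dict, List, Tuple
--
-- def _strip_annotations(body):
--     """Single forward pass: keep blanks verbatim, drop up to two leading
--     annotation lines, copy everything after the first real content line."""
--     priority = None
--     content_type = None
--     result: List[str] = []
--     stripped_count = 0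
--     scanning = True
--     for line in body:
--         s = line.strip()
--         if scanning and s:
--             if stripped_count < 2 and s.startswith("@priority:"):
--                 try:
--                     priority = int(s.split(":", 1)[1].strip())
--                 except ValueError:
--                     priority = None
--                 stripped_count += 1
--                 continue
--             if stripped_count < 2 and s.startswith("@type:"):
--                 content_type = s.split(":", 1)[1].strip()
--                 stripped_count += 1
--                 continue
--             scanning = False
--         result.append(line)
--     return result, priority, content_type
-- ===== Notes on version B (the rewrite author's own statement) =====
-- stated objective: simpler
-- what changed: Replaces A's fixed 2-iteration rescan-from-the-start-and-pop loop with a single forward pass that keeps blanks verbatim and maintains a stripped-annotation count and a scanning flag.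
import Mathlib
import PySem

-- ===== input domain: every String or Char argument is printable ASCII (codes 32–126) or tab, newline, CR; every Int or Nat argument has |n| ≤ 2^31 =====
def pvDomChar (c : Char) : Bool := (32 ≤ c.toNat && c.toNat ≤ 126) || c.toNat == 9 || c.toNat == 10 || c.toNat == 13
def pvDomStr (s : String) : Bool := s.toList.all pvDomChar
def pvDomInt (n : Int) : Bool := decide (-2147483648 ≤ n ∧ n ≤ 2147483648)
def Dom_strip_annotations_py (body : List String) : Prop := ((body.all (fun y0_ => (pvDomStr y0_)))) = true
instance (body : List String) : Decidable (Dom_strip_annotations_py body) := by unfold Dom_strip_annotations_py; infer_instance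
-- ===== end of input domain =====

-- B replaces A's fixed 2-iteration rescan-and-pop loop by one forward pass with a
-- stripped-count and a scanning flag (objective: simpler).

-- ===== PORT A =====
-- shared helpers: both Python sources contain these identical subexpressions
-- line.strip() is truthy  ↔  ¬ pvBlank
def pvBlank (line : String) : Bool := (PySem.Chars.strip line.toList).isEmpty
-- int(s.split(":",1)[1].strip()) with ValueError → None ; s always contains ':' at use sites,
-- so split(":",1) has a second piece (getD 1 [] is exact there)
def pvPriorityVal (s : List Char) : Option Int :=
  PySem.Int.ofChars? (PySem.Chars.strip ((PySem.Chars.splitOnMax s [':'] 1).getD 1 []))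
-- s.split(":",1)[1].strip() for the @type: line
def pvTypeVal (s : List Char) : String :=
  String.ofList (PySem.Chars.strip ((PySem.Chars.splitOnMax s [':'] 1).getD 1 []))

-- the 'for _ in range(2)' loop of A: fuel = remaining iterations; break = return the state.
-- next((i for i,line in enumerate(cleaned) if line.strip()), None) = List.findIdx?;
-- cleaned[idx] at the found (hence valid) index is getD idx ""; cleaned.pop(idx) at a
-- valid index is eraseIdx (PySem.List.pop?_natCast), the popped value being unused.
def pvLoopA : Nat → List String → Option Int → Option String →
    List String × Option Int × Option String
  | 0, cleaned, pr, ct => (cleaned, pr, ct)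
  | n + 1, cleaned, pr, ct =>
    match cleaned.findIdx? (fun line => !(pvBlank line)) with
    | none => (cleaned, pr, ct)
    | some idx =>
      let stripped := PySem.Chars.strip (cleaned.getD idx "").toList
      if PySem.Chars.startswith stripped "@priority:".toList then
        pvLoopA n (cleaned.eraseIdx idx) (pvPriorityVal stripped) ct
      else if PySem.Chars.startswith stripped "@type:".toList then
        pvLoopA n (cleaned.eraseIdx idx) pr (some (pvTypeVal stripped))
      else (cleaned, pr, ct)

def strip_annotations_py (body : List String) : List String × Option Int × Option String :=
  pvLoopA 2 body none none

-- ===== PORT B =====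
-- single forward pass: result accumulator, stripped count c, scanning flag
def pvLoopB : List String → List String → Option Int → Option String → Nat → Bool →
    List String × Option Int × Option String
  | [], res, pr, ct, _, _ => (res, pr, ct)
  | line :: rest, res, pr, ct, c, scanning =>
    let s := PySem.Chars.strip line.toList
    if scanning && !s.isEmpty then
      if decide (c < 2) && PySem.Chars.startswith s "@priority:".toList then
        pvLoopB rest res (pvPriorityVal s) ct (c + 1) scanning
      else if decide (c < 2) && PySem.Chars.startswith s "@type:".toList then
        pvLoopB rest res pr (some (pvTypeVal s)) (c + 1) scanning
      else
        pvLoopB rest (res ++ [line]) pr ct c false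
    else
      pvLoopB rest (res ++ [line]) pr ct c scanning

def strip_annotations_py_alt (body : List String) : List String × Option Int × Option String :=
  pvLoopB body [] none none 0 true

-- ===== PRECONDITION & SPEC =====
def Spec_strip_annotations_py (body : List String) (out : List String × Option Int × Option String) : Prop := out = strip_annotations_py_alt body
instance (body : List String) (out : List String × Option Int × Option String) : Decidable (Spec_strip_annotations_py body out) := by unfold Spec_strip_annotations_py; infer_instance

-- ===== CLAIM (what is proved, stated in full; the proofs are below) =====
def Claim_equal_strip_annotations_py : Prop := ∀ (body : List String), Dom_strip_annotations_py body → Spec_strip_annotations_py body (strip_annotations_py body)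

-- ===== LEMMAS AND PROOFS =====

-- once scanning is off, B copies the remainder verbatim
theorem pvLoopB_done (xs : List String) : ∀ (res : List String) (pr : Option Int)
    (ct : Option String) (c : Nat), pvLoopB xs res pr ct c false = (res ++ xs, pr, ct) := by
  induction xs with
  | nil => intro res pr ct c; simp [pvLoopB]
  | cons line rest ih =>
    intro res pr ct c
    have h : pvLoopB (line :: rest) res pr ct c false
        = pvLoopB rest (res ++ [line]) pr ct c false := by
      simp [pvLoopB]
    rw [h, ih]; simp
-- once two annotations were stripped, B copies the remainder verbatim too
theorem pvLoopB_full (xs : List String) : ∀ (res : List String) (pr : Option Int)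
    (ct : Option String) (c : Nat), 2 ≤ c → pvLoopB xs res pr ct c true = (res ++ xs, pr, ct) := by
  induction xs with
  | nil => intro res pr ct c _; simp [pvLoopB]
  | cons line rest ih =>
    intro res pr ct c hc
    have h2 : ¬ (c < 2) := by omega
    by_cases hb : (PySem.Chars.strip line.toList).isEmpty = true
    · have h : pvLoopB (line :: rest) res pr ct c true
          = pvLoopB rest (res ++ [line]) pr ct c true := by
        simp [pvLoopB, hb]
      rw [h, ih _ _ _ _ hc]; simp
    · have h : pvLoopB (line :: rest) res pr ct c true
          = pvLoopB rest (res ++ [line]) pr ct c false := by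
        simp [pvLoopB, hb, h2]
      rw [h, pvLoopB_done]; simp

-- A passes a leading blank line through untouched (any fuel)
theorem pvLoopA_blank (n : Nat) : ∀ (line : String) (rest : List String) (pr : Option Int)
    (ct : Option String), pvBlank line = true →
    pvLoopA n (line :: rest) pr ct =
      ((line :: (pvLoopA n rest pr ct).1), (pvLoopA n rest pr ct).2) := by
  induction n with
  | zero => intro line rest pr ct _; simp [pvLoopA]
  | succ n ih =>
    intro line rest pr ct hb
    cases hf : rest.findIdx? (fun l => !(pvBlank l)) with
    | none =>
      have hf' : (line :: rest).findIdx? (fun l => !(pvBlank l)) = none := by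
        simp [List.findIdx?_cons, hb, hf]
      simp [pvLoopA, hf', hf]
    | some idx =>
      have hf' : (line :: rest).findIdx? (fun l => !(pvBlank l)) = some (idx + 1) := by
        simp [List.findIdx?_cons, hb, hf]
      have hget : (line :: rest).getD (idx + 1) "" = rest.getD idx "" := rfl
      have herase : (line :: rest).eraseIdx (idx + 1) = line :: rest.eraseIdx idx := rfl
      simp only [pvLoopA, hf', hf, hget, herase]
      split_ifs with h1 h2
      · exact ih _ _ _ _ hb
      · exact ih _ _ _ _ hb
      · rfl

-- the bridge: B's pass with c annotations already stripped equals A's loop with 2-c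
-- iterations left, prefixed by the accumulator
theorem pvLoopB_eq_pvLoopA (body : List String) : ∀ (res : List String) (pr : Option Int)
    (ct : Option String) (c : Nat),
    pvLoopB body res pr ct c true =
      ((res ++ (pvLoopA (2 - c) body pr ct).1), (pvLoopA (2 - c) body pr ct).2) := by
  induction body with
  | nil =>
    intro res pr ct c
    cases h : 2 - c with
    | zero => simp [pvLoopB, pvLoopA]
    | succ n => simp [pvLoopB, pvLoopA]
  | cons line rest ih =>
    intro res pr ct c
    by_cases hb : (PySem.Chars.strip line.toList).isEmpty = true
    · have hbl : pvBlank line = true := hb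
      have h : pvLoopB (line :: rest) res pr ct c true
          = pvLoopB rest (res ++ [line]) pr ct c true := by
        simp [pvLoopB, hb]
      rw [h, ih, pvLoopA_blank (2 - c) line rest pr ct hbl]
      simp
    · by_cases hc : c < 2
      · have hfuel : 2 - c = (2 - (c + 1)) + 1 := by omega
        have ep : "@priority:".toList = ['@','p','r','i','o','r','i','t','y',':'] := rfl
        have et : "@type:".toList = ['@','t','y','p','e',':'] := rfl
        have hfind : (line :: rest).findIdx? (fun l => !(pvBlank l)) = some 0 := by
          simp [List.findIdx?_cons, pvBlank, hb]
        have hstr : PySem.Chars.strip ((line :: rest).getD 0 "").toList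
            = PySem.Chars.strip line.toList := rfl
        by_cases hp : PySem.Chars.startswith (PySem.Chars.strip line.toList) ['@','p','r','i','o','r','i','t','y',':'] = true
        · have h : pvLoopB (line :: rest) res pr ct c true
              = pvLoopB rest res (pvPriorityVal (PySem.Chars.strip line.toList)) ct (c + 1) true := by
            simp [pvLoopB, hb, hc, hp]
          rw [h, ih, hfuel]
          simp only [pvLoopA, hfind, hstr, ep, et, hp, if_true, List.eraseIdx_cons_zero]
        · by_cases ht : PySem.Chars.startswith (PySem.Chars.strip line.toList) ['@','t','y','p','e',':'] = true
          · have h : pvLoopB (line :: rest) res pr ct c true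
                = pvLoopB rest res pr (some (pvTypeVal (PySem.Chars.strip line.toList))) (c + 1) true := by
              simp [pvLoopB, hb, hc, hp, ht]
            rw [h, ih, hfuel]
            simp only [pvLoopA, hfind, hstr, ep, et, hp, Bool.false_eq_true, if_false, ht, if_true,
              List.eraseIdx_cons_zero]
          · have h : pvLoopB (line :: rest) res pr ct c true
                = pvLoopB rest (res ++ [line]) pr ct c false := by
              simp [pvLoopB, hb, hp, ht]
            rw [h, pvLoopB_done, hfuel]
            simp only [pvLoopA, hfind, hstr, ep, et, hp, Bool.false_eq_true, if_false, ht]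
            simp
      · have h0 : 2 - c = 0 := by omega
        rw [pvLoopB_full _ _ _ _ _ (by omega), h0]
        simp [pvLoopA]

-- ===== VERDICT (by name: the statement is the Claim_ definition above) =====
theorem strip_annotations_py_spec : Claim_equal_strip_annotations_py := by
  intro body _
  unfold Spec_strip_annotations_py strip_annotations_py strip_annotations_py_alt
  rw [pvLoopB_eq_pvLoopA]
  simp
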